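-- pv_equiv track=rewrite | github.com/ucfnlp/streamhover | src/utils/utils.py | remove_split_char
-- ===== SOURCE A (Python) =====
-- def remove_split_char(str_list, split_ch='<q>'):
--     new_str_list = []
--     num_sents_pc, num_words_pc, num_words_ps = [], [], []
--     for str_line in str_list:
--         # if str_line.find(split_ch) >= 0:
--         sents = str_line.split(split_ch)
--         num_sents_pc.append(len(sents))
--         nw_ps = [len(utt.split()) for utt in sents]
--         num_words_ps.extend(nw_ps)
--         num_words_pc.append(sum(nw_ps))
--         str_line = ' '.join(sents)
--         new_str_list.append(str_line)
--     return (new_str_list, num_sents_pc, num_words_pc, num_words_ps)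
-- ===== SOURCE B (Python) =====
-- def remove_split_char(str_list, split_ch='<q>'):
--     # One character-level scan per line: a small state machine that simultaneously
--     # rewrites split_ch occurrences to ' ', counts sentences, and counts word starts.
--     new_str_list = []
--     num_sents_pc, num_words_pc, num_words_ps = [], [], []
--     k = len(split_ch)
--     for line in str_list:
--         chars = []        # characters of the rewritten line
--         done = []         # word counts of finished sentences
--         cur = 0           # words seen in the current sentence
--         in_word = False
--         i, n = 0, len(line)
--         while i < n:
--             if k and line.startswith(split_ch, i):
--                 chars.append(' ')
--                 done.append(cur)
--                 cur = 0
--                 in_word = False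
--                 i += k
--             else:
--                 c = line[i]
--                 chars.append(c)
--                 if c.isspace():
--                     in_word = False
--                 elif not in_word:
--                     cur += 1
--                     in_word = True
--                 i += 1
--         counts = done + [cur]
--         new_str_list.append(''.join(chars))
--         num_sents_pc.append(len(counts))
--         num_words_pc.append(sum(counts))
--         num_words_ps.extend(counts)
--     return (new_str_list, num_sents_pc, num_words_pc, num_words_ps)
-- ===== Notes on version B (the rewrite author's own statement) =====
-- stated objective: alternative
-- what changed: Replaces A's three library passes per line (split on the delimiter, whitespace-split each sentence, join back) by a single character-level scan with a small state machine that rewrites the delimiter to ' ' and counts sentence boundaries and word starts in one pass.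
import Mathlib
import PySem

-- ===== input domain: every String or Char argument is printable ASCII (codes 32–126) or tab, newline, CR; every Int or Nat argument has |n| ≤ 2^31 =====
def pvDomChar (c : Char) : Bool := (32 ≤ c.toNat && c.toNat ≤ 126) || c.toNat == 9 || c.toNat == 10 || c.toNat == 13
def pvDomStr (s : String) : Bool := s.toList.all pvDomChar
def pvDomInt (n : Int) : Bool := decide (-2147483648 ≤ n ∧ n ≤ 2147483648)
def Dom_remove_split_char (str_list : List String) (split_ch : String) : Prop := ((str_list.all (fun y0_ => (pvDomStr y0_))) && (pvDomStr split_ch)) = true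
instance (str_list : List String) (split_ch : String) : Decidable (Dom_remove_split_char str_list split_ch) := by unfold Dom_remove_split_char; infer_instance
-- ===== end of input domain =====

-- B replaces A's per-line library passes (split on the delimiter, whitespace-split each
-- sentence, join back) by a single character-level scan producing the same four outputs.


-- ===== PORT A =====
-- str_line.split(split_ch); exact when split_ch ≠ "" (Pre_ excludes "" — Python raises ValueError there)
def pvSplit (s sep : String) : List String := (PySem.Str.split? s sep).getD [s]

-- word count of one sentence: len(utt.split())
def pvNW (utt : String) : Int := ((PySem.Str.split₀ utt).length : Int)

def remove_split_char (str_list : List String) (split_ch : String) : List String × List Int × List Int × List Int :=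
  str_list.foldl
    (fun st str_line =>
      let sents := pvSplit str_line split_ch
      let nw_ps := sents.map pvNW
      (st.1 ++ [PySem.Str.join " " sents],
       st.2.1 ++ [(sents.length : Int)],
       st.2.2.1 ++ [nw_ps.sum],
       st.2.2.2 ++ nw_ps))
    ([], [], [], [])

-- ===== PORT B =====
-- the inner `while i < n` scan of Source B: fuel = number of characters not yet consumed (n - i),
-- so the recursion is structural; every step consumes at least one character, so with initial
-- fuel = length of the line the 0/cons case is unreachable.
-- state: chars (rewritten line so far), done (word counts of finished sentences),
-- cur (words in current sentence), inw (in_word flag); c.isspace() → PySem.Chars.isspace (exact)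
def pvScan (sep : List Char) : Nat → List Char → List Char → List Nat → Nat → Bool → List Char × List Nat
  | _, [], chars, done, cur, _ => (chars, done ++ [cur])
  | 0, _ :: _, chars, done, cur, _ => (chars, done ++ [cur])
  | fuel + 1, c :: rest, chars, done, cur, inw =>
    if sep ≠ [] ∧ sep.isPrefixOf (c :: rest) then
      pvScan sep fuel ((c :: rest).drop sep.length) (chars ++ [' ']) (done ++ [cur]) 0 false
    else if PySem.Chars.isspace c then
      pvScan sep fuel rest (chars ++ [c]) done cur false
    else if inw then
      pvScan sep fuel rest (chars ++ [c]) done cur inw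
    else
      pvScan sep fuel rest (chars ++ [c]) done (cur + 1) true

def remove_split_char_alt (str_list : List String) (split_ch : String) : List String × List Int × List Int × List Int :=
  str_list.foldl
    (fun st line =>
      let r := pvScan split_ch.toList line.toList.length line.toList [] [] 0 false
      let counts := r.2.map (fun n => (n : Int))
      (st.1 ++ [String.ofList r.1],
       st.2.1 ++ [(counts.length : Int)],
       st.2.2.1 ++ [counts.sum],
       st.2.2.2 ++ counts))
    ([], [], [], [])

-- ===== PRECONDITION & SPEC =====
-- Pre_ excludes exactly the raising inputs: split_ch = '' with a nonempty list makes Python's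
-- str.split raise ValueError in A; on the empty list A's loop never runs.
def Pre_remove_split_char (str_list : List String) (split_ch : String) : Prop := split_ch ≠ "" ∨ str_list = []
instance (str_list : List String) (split_ch : String) : Decidable (Pre_remove_split_char str_list split_ch) := by unfold Pre_remove_split_char; infer_instance
def pvWitness_remove_split_char : List String × String := (["a<q>b c", "x"], "<q>")

def Spec_remove_split_char (str_list : List String) (split_ch : String) (out : List String × List Int × List Int × List Int) : Prop := out = remove_split_char_alt str_list split_ch
instance (str_list : List String) (split_ch : String) (out : List String × List Int × List Int × List Int) : Decidable (Spec_remove_split_char str_list split_ch out) := by unfold Spec_remove_split_char; infer_instance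

-- ===== CLAIM (what is proved, stated in full; the proofs are below) =====
def Claim_equal_remove_split_char : Prop := ∀ (str_list : List String) (split_ch : String), Dom_remove_split_char str_list split_ch → Pre_remove_split_char str_list split_ch → Spec_remove_split_char str_list split_ch (remove_split_char str_list split_ch)

-- ===== LEMMAS AND PROOFS =====

-- proof-side reference splitter: the structural form of Python's str.split(sep), sep ≠ ''
def pvConsHead (c : Char) : List (List Char) → List (List Char)
  | [] => [[c]]
  | h :: t => (c :: h) :: t

def pvSp (sep : List Char) : List Char → List (List Char)
  | [] => [[]]
  | c :: rest =>
    if h : sep ≠ [] ∧ sep.isPrefixOf (c :: rest) then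
      [] :: pvSp sep ((c :: rest).drop sep.length)
    else
      pvConsHead c (pvSp sep rest)
termination_by l => l.length
decreasing_by
  · simp only [List.length_drop, List.length_cons]
    have : 1 ≤ sep.length := List.length_pos_iff.mpr h.1
    omega
  · simp

-- pvWcount inw cs = number of word starts in cs, given that cs starts inside a word iff inw
def pvWcount : Bool → List Char → Nat
  | _, [] => 0
  | inw, c :: r =>
    if PySem.Chars.isspace c then pvWcount false r
    else if inw then pvWcount true r
    else 1 + pvWcount true r

theorem pvSp_ne_nil (sep : List Char) (l : List Char) : pvSp sep l ≠ [] := by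
  induction l using pvSp.induct sep with
  | case1 => simp [pvSp]
  | case2 c rest h ih => rw [pvSp]; simp [h]
  | case3 c rest h ih =>
    rw [pvSp]; simp only [h, dite_false]
    cases pvSp sep rest <;> simp [pvConsHead]

theorem pvSplitOn_go_spec (sep : List Char) (hsep : sep ≠ []) :
    ∀ (fuel : Nat) (l cur : List Char) (acc : List (List Char)), l.length ≤ fuel →
      PySem.Chars.splitOn.go sep fuel l cur acc =
        acc.reverse ++ (pvSp sep l).modifyHead (fun p => cur.reverse ++ p) := by
  intro fuel
  induction fuel with
  | zero =>
    intro l cur acc hl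
    have : l = [] := by cases l <;> simp_all
    subst this
    rw [PySem.Chars.splitOn.go]
    simp [pvSp]
  | succ fuel ih =>
    intro l cur acc hl
    cases l with
    | nil => rw [PySem.Chars.splitOn.go]; simp [pvSp]; omega
    | cons c rest =>
      rw [PySem.Chars.splitOn.go]
      by_cases hp : sep.isPrefixOf (c :: rest)
      · simp only [hp, if_true]
        have hd : ((c :: rest).drop sep.length).length ≤ fuel := by
          have : 1 ≤ sep.length := List.length_pos_iff.mpr hsep
          simp only [List.length_drop, List.length_cons]
          simp only [List.length_cons] at hl
          omega
        rw [ih _ [] _ hd]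
        have hs : pvSp sep (c :: rest) = [] :: pvSp sep ((c :: rest).drop sep.length) := by
          rw [pvSp]; simp [hsep, hp]
        rw [hs]
        rcases hne : pvSp sep ((c :: rest).drop sep.length) with _ | ⟨s, t⟩
        · exact absurd hne (pvSp_ne_nil _ _)
        · simp
      · simp only [hp, Bool.false_eq_true, if_false]
        have hr : rest.length ≤ fuel := by simp at hl; omega
        rw [ih _ (c :: cur) _ hr]
        have hs : pvSp sep (c :: rest) = pvConsHead c (pvSp sep rest) := by
          rw [pvSp, dif_neg (by tauto)]
        rw [hs]
        rcases hne : pvSp sep rest with _ | ⟨s, t⟩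
        · exact absurd hne (pvSp_ne_nil _ _)
        · simp [pvConsHead]

theorem pvSplitOn_eq_sp (sep : List Char) (hsep : sep ≠ []) (l : List Char) :
    PySem.Chars.splitOn l sep = pvSp sep l := by
  unfold PySem.Chars.splitOn
  rw [pvSplitOn_go_spec sep hsep _ _ _ _ (by omega)]
  rcases hne : pvSp sep l with _ | ⟨s, t⟩
  · exact absurd hne (pvSp_ne_nil _ _)
  · simp

theorem pvSplit0_go_len : ∀ (cs cur : List Char) (acc : List (List Char)),
    (PySem.Chars.split₀.go cs cur acc).length =
      acc.length + (if cur.isEmpty then 0 else 1) + pvWcount (!cur.isEmpty) cs := by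
  intro cs
  induction cs with
  | nil =>
    intro cur acc
    rw [PySem.Chars.split₀.go]
    by_cases h : cur.isEmpty <;> simp [h, pvWcount]
  | cons c rest ih =>
    intro cur acc
    rw [PySem.Chars.split₀.go]
    by_cases hs : PySem.Chars.isspace c
    · by_cases h : cur.isEmpty <;> simp [hs, h, ih, pvWcount]
    · have h1 : (c :: cur).isEmpty = false := by simp
      simp only [hs, if_false, Bool.false_eq_true, ih, h1]
      by_cases h : cur.isEmpty <;> simp [h, pvWcount, hs] <;> omega

theorem pvSplit0_len (cs : List Char) : (PySem.Chars.split₀ cs).length = pvWcount false cs := by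
  unfold PySem.Chars.split₀
  rw [pvSplit0_go_len]
  simp

theorem pvScan_spec (sep : List Char) (hsep : sep ≠ []) :
    ∀ (fuel : Nat) (l : List Char), l.length ≤ fuel → ∀ (chars : List Char) (done : List Nat) (cur : Nat) (inw : Bool),
      pvScan sep fuel l chars done cur inw =
        (chars ++ PySem.Chars.join [' '] (pvSp sep l),
         done ++ (match pvSp sep l with
                  | [] => []
                  | s :: t => (cur + pvWcount inw s) :: t.map (pvWcount false))) := by
  intro fuel
  induction fuel with
  | zero =>
    intro l hl chars done cur inw
    have : l = [] := by cases l <;> simp_all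
    subst this
    simp [pvScan, pvSp, PySem.Chars.join_singleton, pvWcount]
  | succ fuel ih =>
    intro l hl chars done cur inw
    cases l with
    | nil => simp [pvScan, pvSp, PySem.Chars.join_singleton, pvWcount]
    | cons c rest =>
      rw [pvScan]
      by_cases hp : sep.isPrefixOf (c :: rest)
      · simp only [hsep, hp, ne_eq, not_false_iff, and_self, if_true]
        have hd : ((c :: rest).drop sep.length).length ≤ fuel := by
          have : 1 ≤ sep.length := List.length_pos_iff.mpr hsep
          simp only [List.length_drop, List.length_cons]
          simp only [List.length_cons] at hl
          omega
        rw [ih _ hd]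
        have hs : pvSp sep (c :: rest) = [] :: pvSp sep ((c :: rest).drop sep.length) := by
          rw [pvSp]; simp [hsep, hp]
        rw [hs]
        rcases hne : pvSp sep ((c :: rest).drop sep.length) with _ | ⟨s, t⟩
        · exact absurd hne (pvSp_ne_nil _ _)
        · simp [PySem.Chars.join_cons_cons, pvWcount]
      · have hcond : ¬ (sep ≠ [] ∧ sep.isPrefixOf (c :: rest)) := by tauto
        have hr : rest.length ≤ fuel := by simp at hl; omega
        have hs : pvSp sep (c :: rest) = pvConsHead c (pvSp sep rest) := by
          rw [pvSp, dif_neg hcond]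
        rw [hs, if_neg hcond]
        rcases hne : pvSp sep rest with _ | ⟨s, t⟩
        · exact absurd hne (pvSp_ne_nil _ _)
        · by_cases hsp : PySem.Chars.isspace c
          · rw [if_pos hsp, ih _ hr, hne]
            rcases t with _ | ⟨s2, t'⟩ <;>
              simp [pvConsHead, PySem.Chars.join_singleton, PySem.Chars.join_cons_cons, pvWcount, hsp]
          · rw [if_neg hsp]
            cases inw
            · rw [if_neg (by simp), ih _ hr, hne]
              rcases t with _ | ⟨s2, t'⟩ <;>
                simp [pvConsHead, PySem.Chars.join_singleton, PySem.Chars.join_cons_cons, pvWcount, hsp, Nat.add_assoc]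
            · rw [if_pos rfl, ih _ hr, hne]
              rcases t with _ | ⟨s2, t'⟩ <;>
                simp [pvConsHead, PySem.Chars.join_singleton, PySem.Chars.join_cons_cons, pvWcount, hsp]

theorem pvNW_ofList (s : List Char) : pvNW (String.ofList s) = (pvWcount false s : Int) := by
  unfold pvNW
  have h := congrArg List.length (PySem.Str.split₀_map_toList (String.ofList s))
  simp only [List.length_map] at h
  simp only [String.toList_ofList] at h
  rw [h, pvSplit0_len]

theorem pvSplit_eq_sp (line split_ch : String) (hsep : split_ch ≠ "") :
    pvSplit line split_ch = (pvSp split_ch.toList line.toList).map String.ofList := by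
  have hsl : split_ch.toList ≠ [] := by simp [hsep]
  have h := PySem.Str.split?_map line split_ch
  unfold pvSplit
  rw [PySem.Chars.split?] at h
  simp only [List.isEmpty_iff, hsl, if_false] at h
  rw [pvSplitOn_eq_sp _ hsl] at h
  rcases hq : PySem.Str.split? line split_ch with _ | parts
  · rw [hq] at h; simp at h
  · rw [hq] at h
    simp only [Option.map_some, Option.some.injEq] at h
    simp only [Option.getD_some]
    have h2 : parts.map (String.ofList ∘ String.toList) = (pvSp split_ch.toList line.toList).map String.ofList := by
      rw [← List.map_map, h]
    simpa [Function.comp_def] using h2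

-- ===== VERDICT (by name: the statement is the Claim_ definition above) =====
theorem remove_split_char_spec : Claim_equal_remove_split_char := by
  intro str_list split_ch _ hpre
  unfold Spec_remove_split_char
  rcases eq_or_ne split_ch "" with hsc | hsc
  · rcases hpre with h | h
    · exact absurd hsc h
    · subst h; rfl
  · have hsl : split_ch.toList ≠ [] := by simp [hsc]
    unfold remove_split_char remove_split_char_alt
    refine List.foldl_ext _ _ _ ?_
    intro st line _
    simp only
    rw [pvSplit_eq_sp line split_ch hsc,
        pvScan_spec split_ch.toList hsl line.toList.length line.toList (le_refl _) [] [] 0 false]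
    rcases hne : pvSp split_ch.toList line.toList with _ | ⟨s, t⟩
    · exact absurd hne (pvSp_ne_nil _ _)
    · have hjoin : PySem.Str.join " " (String.ofList s :: t.map String.ofList) =
          String.ofList (PySem.Chars.join [' '] (s :: t)) := by
        simp [PySem.Str.join, Function.comp_def]
      have hmap : (String.ofList s :: t.map String.ofList).map pvNW
          = ((0 + pvWcount false s) :: t.map (pvWcount false)).map (fun n => (n : Int)) := by
        simp [pvNW_ofList, List.map_map, Function.comp_def, ← List.map_eq_flatMap]
      refine Prod.ext ?_ (Prod.ext ?_ (Prod.ext ?_ ?_))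
      · simpa using congrArg (fun x => st.1 ++ [x]) hjoin
      · simp [← List.map_eq_flatMap]
      · have h3 := congrArg (fun x => st.2.2.1 ++ [x.sum]) hmap
        simpa [← List.map_eq_flatMap] using h3
      · have h4 := congrArg (fun x => st.2.2.2 ++ x) hmap
        simpa [← List.map_eq_flatMap] using h4
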